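-- pv_equiv track=rewrite | github.com/grimmsgadgets-cmyk/actortracker | app.py | _actor_search_queries
-- ===== SOURCE A (Python) =====
-- def _actor_search_queries(actor_terms: list[str]) -> list[str]:
--     queries: list[str] = []
--     for term in actor_terms:
--         compact = term.strip()
--         if len(compact) < 3 or len(compact) > 60:
--             continue
--         queries.extend(
--             [
--                 f'"{compact}" ransomware activity',
--                 f'"{compact}" threat actor report',
--                 f'"{compact}" CISA advisory',
--             ]
--         )
--         if len(queries) >= 9:
--             break
--     return queries[:9]
-- ===== SOURCE B (Python) =====
-- def _actor_search_queries(actor_terms: list[str]) -> list[str]: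
--     return _take_queries(iter(actor_terms), 3)
--
--
-- def _next_valid(it):
--     """Advance the iterator to the first surviving (stripped, length 3..60) term."""
--     for term in it:
--         compact = term.strip()
--         if 3 <= len(compact) <= 60:
--             return compact
--     return None
--
--
-- def _take_queries(it, slots: int) -> list[str]:
--     """Emit the next surviving term's three queries, recursing while slots remain (depth <= 3)."""
--     if slots == 0:
--         return []
--     compact = _next_valid(it)
--     if compact is None:
--         return []
--     return [
--         '"%s" ransomware activity' % compact,
--         '"%s" threat actor report' % compact,
--         '"%s" CISA advisory' % compact,
--     ] + _take_queries(it, slots - 1)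
-- ===== Notes on version B (the rewrite author's own statement) =====
-- stated objective: alternative
-- what changed: Replaced A's single accumulator loop (filter+format interleaved, early break at 9 queries, trailing [:9] slice) by a next-match scanner that advances an iterator to the next surviving term plus a recursion on the remaining slots (3), consing each triple onto the recursive result; no accumulator, no length check and no slicing exist.
import Mathlib
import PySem

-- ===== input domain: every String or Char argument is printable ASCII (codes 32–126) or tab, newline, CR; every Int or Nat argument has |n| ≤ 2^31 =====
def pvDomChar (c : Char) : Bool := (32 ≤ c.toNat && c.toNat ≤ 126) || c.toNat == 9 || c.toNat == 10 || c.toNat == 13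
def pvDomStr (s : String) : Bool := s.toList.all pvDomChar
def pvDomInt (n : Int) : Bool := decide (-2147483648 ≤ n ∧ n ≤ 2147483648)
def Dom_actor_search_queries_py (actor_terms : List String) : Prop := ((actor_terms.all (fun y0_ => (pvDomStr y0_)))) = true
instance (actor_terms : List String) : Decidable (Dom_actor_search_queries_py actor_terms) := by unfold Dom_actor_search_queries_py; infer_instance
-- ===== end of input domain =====

-- B replaces A's accumulator loop (break at 9 queries, trailing [:9] slice) by a next-match
-- scanner over an iterator plus recursion on the remaining slots (depth <= 3); objective: alternative.

-- ===== PORT A =====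
-- loop over actor_terms with accumulator `queries`; `break` becomes returning the accumulator
def pvGoA : List String → List String → List String
  | [], queries => queries
  | term :: rest, queries =>
    let compact := PySem.Str.strip term
    if PySem.Str.len compact < 3 ∨ PySem.Str.len compact > 60 then
      pvGoA rest queries
    else
      let queries' := queries ++
        ["\"" ++ compact ++ "\" ransomware activity",
         "\"" ++ compact ++ "\" threat actor report",
         "\"" ++ compact ++ "\" CISA advisory"]
      if 9 ≤ PySem.List.len queries' then queries' else pvGoA rest queries'

def actor_search_queries_py (actor_terms : List String) : List String :=
  PySem.List.slice (pvGoA actor_terms []) none (some 9)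

-- ===== PORT B =====
-- `_next_valid`: advance the iterator to the first surviving term; the Python iterator is
-- modelled exactly by the remaining list, so it returns (term, rest-of-iterator) or none
def pvNextValid : List String → Option (String × List String)
  | [] => none
  | term :: it =>
    let compact := PySem.Str.strip term
    if 3 ≤ PySem.Str.len compact ∧ PySem.Str.len compact ≤ 60 then
      some (compact, it)
    else
      pvNextValid it

-- `_take_queries`: recursion on the remaining slots
def pvTakeQueries : List String → Nat → List String
  | _, 0 => []
  | it, Nat.succ s =>
    match pvNextValid it with
    | none => []
    | some (compact, it') =>
      ["\"" ++ compact ++ "\" ransomware activity",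
       "\"" ++ compact ++ "\" threat actor report",
       "\"" ++ compact ++ "\" CISA advisory"] ++ pvTakeQueries it' s

def actor_search_queries_py_alt (actor_terms : List String) : List String :=
  pvTakeQueries actor_terms 3

-- ===== PRECONDITION & SPEC =====
def Spec_actor_search_queries_py (actor_terms : List String) (out : List String) : Prop := out = actor_search_queries_py_alt actor_terms
instance (actor_terms : List String) (out : List String) : Decidable (Spec_actor_search_queries_py actor_terms out) := by unfold Spec_actor_search_queries_py; infer_instance

-- ===== CLAIM (what is proved, stated in full; the proofs are below) =====
def Claim_equal_actor_search_queries_py : Prop := ∀ (actor_terms : List String), Dom_actor_search_queries_py actor_terms → Spec_actor_search_queries_py actor_terms (actor_search_queries_py actor_terms)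

-- ===== LEMMAS AND PROOFS =====

lemma pvTakeQueries_zero (l : List String) : pvTakeQueries l 0 = [] := by
  cases l <;> rfl

lemma pvTakeQueries_invalid (t : String) (rest : List String) (s : Nat)
    (h : ¬ (3 ≤ PySem.Str.len (PySem.Str.strip t) ∧ PySem.Str.len (PySem.Str.strip t) ≤ 60)) :
    pvTakeQueries (t :: rest) s = pvTakeQueries rest s := by
  cases s with
  | zero => rw [pvTakeQueries_zero, pvTakeQueries_zero]
  | succ s' =>
    rw [pvTakeQueries, pvTakeQueries, pvNextValid]
    simp only [if_neg h]

lemma pvTakeQueries_valid (t : String) (rest : List String) (s : Nat)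
    (h : 3 ≤ PySem.Str.len (PySem.Str.strip t) ∧ PySem.Str.len (PySem.Str.strip t) ≤ 60) :
    pvTakeQueries (t :: rest) (Nat.succ s) =
      ["\"" ++ PySem.Str.strip t ++ "\" ransomware activity",
       "\"" ++ PySem.Str.strip t ++ "\" threat actor report",
       "\"" ++ PySem.Str.strip t ++ "\" CISA advisory"] ++ pvTakeQueries rest s := by
  rw [pvTakeQueries, pvNextValid]
  simp only [if_pos h]

-- invariant of A's loop: with 3*k queries accumulated (k < 3), the loop appends
-- exactly what B's slot countdown with 3-k slots produces
lemma pvGoA_eq (ts : List String) : ∀ (qs : List String) (k : Nat),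
    qs.length = 3 * k → k < 3 →
    pvGoA ts qs = qs ++ pvTakeQueries ts (3 - k) := by
  induction ts with
  | nil =>
    intro qs k _ hk
    have h3 : 3 - k = Nat.succ (2 - k) := by omega
    simp [pvGoA, h3, pvTakeQueries, pvNextValid]
  | cons t rest ih =>
    intro qs k hlen hk
    have h3 : 3 - k = Nat.succ (2 - k) := by omega
    rw [pvGoA]
    by_cases hbad : PySem.Str.len (PySem.Str.strip t) < 3 ∨ PySem.Str.len (PySem.Str.strip t) > 60
    · have hp : ¬ (3 ≤ PySem.Str.len (PySem.Str.strip t) ∧ PySem.Str.len (PySem.Str.strip t) ≤ 60) := by omega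
      rw [if_pos hbad, pvTakeQueries_invalid t rest _ hp, ih qs k hlen hk]
    · have hp : 3 ≤ PySem.Str.len (PySem.Str.strip t) ∧ PySem.Str.len (PySem.Str.strip t) ≤ 60 := by omega
      rw [if_neg hbad, h3, pvTakeQueries_valid t rest _ hp]
      set trip := ["\"" ++ PySem.Str.strip t ++ "\" ransomware activity",
                   "\"" ++ PySem.Str.strip t ++ "\" threat actor report",
                   "\"" ++ PySem.Str.strip t ++ "\" CISA advisory"] with htrip
      have hlen' : (qs ++ trip).length = 3 * (k + 1) := by simp [htrip, hlen]; omega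
      by_cases hfull : k = 2
      · have h9 : (9 : Int) ≤ PySem.List.len (qs ++ trip) := by
          simp [PySem.List.len_eq, hlen', hfull]
        rw [if_pos h9]
        subst hfull
        rw [pvTakeQueries_zero]
        simp
      · have h9 : ¬ (9 : Int) ≤ PySem.List.len (qs ++ trip) := by
          simp [PySem.List.len_eq, hlen']; omega
        rw [if_neg h9, ih _ (k + 1) hlen' (by omega)]
        have h2k : 2 - k = 3 - (k + 1) := by omega
        rw [h2k, List.append_assoc]

lemma pvTakeQueries_len_le : ∀ (s : Nat) (ts : List String), (pvTakeQueries ts s).length ≤ 3 * s := by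
  intro s
  induction s with
  | zero => intro ts; rw [pvTakeQueries_zero]; simp
  | succ s' ih =>
    intro ts
    rw [pvTakeQueries]
    cases h : pvNextValid ts with
    | none => simp
    | some p =>
      have := ih p.2
      simp only [List.length_append, List.length_cons, List.length_nil]
      omega

-- ===== VERDICT (by name: the statement is the Claim_ definition above) =====
theorem actor_search_queries_py_spec : Claim_equal_actor_search_queries_py := by
  intro ts _
  show actor_search_queries_py ts = actor_search_queries_py_alt ts
  unfold actor_search_queries_py actor_search_queries_py_alt
  rw [pvGoA_eq ts [] 0 (by simp) (by omega), List.nil_append]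
  have hb : (9 : Int) = ((9 : Nat) : Int) := by norm_num
  rw [hb, PySem.List.slice_to_natCast]
  exact List.take_of_length_le (by have := pvTakeQueries_len_le 3 ts; omega)
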